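-- pv_equiv track=rewrite | github.com/ska-telescope/ska-low-mccs-daq | python/pyaavs/tile.py | calculate_delay
-- ===== SOURCE A (Python) =====
-- def calculate_delay(current_delay, current_tc, target, margin):
--     """
--     Calculate delay for PPS pulse.
--
--     :param current_delay: Current delay
--     :type current_delay: int
--     :param current_tc: Current phase register terminal count
--     :type current_tc: int
--     :param target: target delay
--     :type target: int
--     :param margin: marging, target +-margin
--     :type margin: int
--     :return: Modified phase register terminal count
--     :rtype: int
--     """
--     ref_low = target - margin
--     ref_hi = target + margin
--     for n in range(5):
--         if current_delay <= ref_low: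
--             new_delay = current_delay + int((n * 40) / 5)
--             new_tc = (current_tc + n) % 5
--             if new_delay >= ref_low:
--                 return new_tc
--         elif current_delay >= ref_hi:
--             new_delay = current_delay - int((n * 40) / 5)
--             new_tc = current_tc - n
--             if new_tc < 0:
--                 new_tc += 5
--             if new_delay <= ref_hi:
--                 return new_tc
--         else:
--             return current_tc
--
--     raise ValueError("Unable to calculate delay for PPS pulse "
--         f"current_delay {current_delay}, "
--         f"current_tc {current_tc}, "
--         f"target {current_tc}, "
--         f"margin {margin}"
--     )
-- ===== SOURCE B (Python) =====
-- def calculate_delay(current_delay, current_tc, target, margin):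
--     """Closed-form: compute the minimal number of 8ns steps directly instead of looping."""
--     ref_low = target - margin
--     ref_hi = target + margin
--     if current_delay <= ref_low:
--         n = -((current_delay - ref_low) // 8)  # ceil((ref_low - current_delay)/8)
--         if n <= 4:
--             return (current_tc + n) % 5
--     elif current_delay >= ref_hi:
--         n = -((ref_hi - current_delay) // 8)  # ceil((current_delay - ref_hi)/8)
--         if n <= 4:
--             new_tc = current_tc - n
--             if new_tc < 0:
--                 new_tc += 5
--             return new_tc
--     else:
--         return current_tc
--     raise ValueError("Unable to calculate delay for PPS pulse "
--         f"current_delay {current_delay}, "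
--         f"current_tc {current_tc}, "
--         f"target {current_tc}, "
--         f"margin {margin}"
--     )
-- ===== Notes on version B (the rewrite author's own statement) =====
-- stated objective: simpler
-- what changed: Replaces the 5-iteration search loop with a closed-form ceiling division computing the needed step count n directly, then one branch per case.
import Mathlib
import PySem

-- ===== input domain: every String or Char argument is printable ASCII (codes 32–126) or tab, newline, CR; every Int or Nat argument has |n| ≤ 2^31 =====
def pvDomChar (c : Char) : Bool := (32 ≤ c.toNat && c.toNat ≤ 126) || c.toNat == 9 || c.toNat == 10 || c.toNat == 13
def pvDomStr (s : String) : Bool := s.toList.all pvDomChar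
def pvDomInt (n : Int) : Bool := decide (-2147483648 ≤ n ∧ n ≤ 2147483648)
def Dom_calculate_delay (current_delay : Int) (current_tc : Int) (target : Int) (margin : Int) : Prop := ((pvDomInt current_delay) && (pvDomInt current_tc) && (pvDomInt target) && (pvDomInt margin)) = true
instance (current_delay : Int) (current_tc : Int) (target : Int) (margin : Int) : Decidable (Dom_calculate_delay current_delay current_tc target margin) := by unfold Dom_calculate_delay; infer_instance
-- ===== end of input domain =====

-- B replaces A's 5-iteration search loop with a closed-form ceiling division (objective: simpler).


-- ===== PORT A =====
-- A's for-loop over range(5); none = the final raise (excluded by Pre_).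
def calculate_delay_loop (current_delay : Int) (current_tc : Int) (ref_low : Int) (ref_hi : Int) : List Int → Option Int
  | [] => none
  | n :: ns =>
    if current_delay ≤ ref_low then
      let new_delay := current_delay + PySem.Int.floordiv (n * 40) 5
      let new_tc := PySem.Int.mod (current_tc + n) 5
      if new_delay ≥ ref_low then some new_tc
      else calculate_delay_loop current_delay current_tc ref_low ref_hi ns
    else if current_delay ≥ ref_hi then
      let new_delay := current_delay - PySem.Int.floordiv (n * 40) 5
      let new_tc := current_tc - n
      let new_tc := if new_tc < 0 then new_tc + 5 else new_tc
      if new_delay ≤ ref_hi then some new_tc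
      else calculate_delay_loop current_delay current_tc ref_low ref_hi ns
    else some current_tc

def calculate_delay (current_delay : Int) (current_tc : Int) (target : Int) (margin : Int) : Int :=
  let ref_low := target - margin
  let ref_hi := target + margin
  (calculate_delay_loop current_delay current_tc ref_low ref_hi [0, 1, 2, 3, 4]).getD 0

-- ===== PORT B =====
-- closed form; 0 on the raise path (excluded by Pre_)
def calculate_delay_alt (current_delay : Int) (current_tc : Int) (target : Int) (margin : Int) : Int :=
  let ref_low := target - margin
  let ref_hi := target + margin
  if current_delay ≤ ref_low then
    let n := -(PySem.Int.floordiv (current_delay - ref_low) 8)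
    if n ≤ 4 then PySem.Int.mod (current_tc + n) 5 else 0
  else if current_delay ≥ ref_hi then
    let n := -(PySem.Int.floordiv (ref_hi - current_delay) 8)
    if n ≤ 4 then
      let new_tc := current_tc - n
      if new_tc < 0 then new_tc + 5 else new_tc
    else 0
  else current_tc

-- ===== PRECONDITION & SPEC =====
-- Pre_ excludes exactly the inputs on which A raises ValueError: the active side is more than 32 (= 4 steps of 8) away from the reference band.
def Pre_calculate_delay (current_delay : Int) (current_tc : Int) (target : Int) (margin : Int) : Prop :=
  ¬ ((current_delay ≤ target - margin ∧ target - margin - current_delay > 32) ∨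
     (¬ current_delay ≤ target - margin ∧ current_delay ≥ target + margin ∧ current_delay - (target + margin) > 32))
instance (current_delay : Int) (current_tc : Int) (target : Int) (margin : Int) : Decidable (Pre_calculate_delay current_delay current_tc target margin) := by unfold Pre_calculate_delay; infer_instance

def pvWitness_calculate_delay : Int × Int × Int × Int := (10, 2, 20, 3)

def Spec_calculate_delay (current_delay : Int) (current_tc : Int) (target : Int) (margin : Int) (out : Int) : Prop := out = calculate_delay_alt current_delay current_tc target margin
instance (current_delay : Int) (current_tc : Int) (target : Int) (margin : Int) (out : Int) : Decidable (Spec_calculate_delay current_delay current_tc target margin out) := by unfold Spec_calculate_delay; infer_instance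

-- ===== CLAIM (what is proved, stated in full; the proofs are below) =====
def Claim_equal_calculate_delay : Prop := ∀ (current_delay : Int) (current_tc : Int) (target : Int) (margin : Int), Dom_calculate_delay current_delay current_tc target margin → Pre_calculate_delay current_delay current_tc target margin → Spec_calculate_delay current_delay current_tc target margin (calculate_delay current_delay current_tc target margin)

-- ===== LEMMAS AND PROOFS =====

-- ===== VERDICT (by name: the statement is the Claim_ definition above) =====
set_option maxHeartbeats 2000000 in
theorem calculate_delay_spec : Claim_equal_calculate_delay := by
  intro cd tc t m _ hpre
  unfold Pre_calculate_delay at hpre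
  unfold Spec_calculate_delay calculate_delay calculate_delay_alt
  simp only [calculate_delay_loop,
    show ∀ a : Int, PySem.Int.floordiv a 8 = a / 8 from
      fun a => PySem.Int.floordiv_eq_ediv_of_pos (by norm_num),
    show ∀ a : Int, PySem.Int.floordiv a 5 = a / 5 from
      fun a => PySem.Int.floordiv_eq_ediv_of_pos (by norm_num),
    show ∀ a : Int, PySem.Int.mod a 5 = a % 5 from
      fun a => PySem.Int.mod_eq_emod_of_pos (by norm_num)]
  split_ifs <;> simp_all [Option.getD] <;> omega
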